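-- pv_equiv track=rewrite | github.com/yangjames/Notorious-B.I.G.P.T | datasets/dataset.py | _split_and_cat
-- ===== SOURCE A (Python) =====
-- def _split_and_cat(word : str):
--     split_word = []
--     cumulative_word = ""
--     for char in word:
--         if char not in [",", "\n", ".", "?", "!", "(", ")"]:
--             cumulative_word += char
--         elif len(cumulative_word) == 0:
--             split_word += [char]
--         else:
--             split_word += [cumulative_word, char]
--             cumulative_word = ""
--     if len(cumulative_word) > 0:
--         split_word += [cumulative_word]
--     return split_word
-- ===== SOURCE B (Python) =====
-- import re
--
-- def _split_and_cat(word: str):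
--     return re.findall(r'[^,\n.?!()]+|[,\n.?!()]', word)
-- ===== Notes on version B (the rewrite author's own statement) =====
-- stated objective: idiomatic
-- what changed: Replaces the character-by-character accumulator/flush loop with a single regex findall matching maximal non-punctuation runs or single punctuation characters.
import Mathlib
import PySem

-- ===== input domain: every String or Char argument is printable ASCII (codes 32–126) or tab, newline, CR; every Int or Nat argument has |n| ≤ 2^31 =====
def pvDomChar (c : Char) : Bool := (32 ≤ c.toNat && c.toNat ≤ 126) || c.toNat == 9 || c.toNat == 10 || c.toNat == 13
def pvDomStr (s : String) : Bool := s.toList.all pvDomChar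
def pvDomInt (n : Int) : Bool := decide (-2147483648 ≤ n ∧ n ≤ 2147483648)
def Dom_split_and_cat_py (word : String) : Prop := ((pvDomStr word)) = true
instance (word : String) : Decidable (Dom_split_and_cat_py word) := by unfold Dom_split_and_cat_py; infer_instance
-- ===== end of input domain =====

-- B replaces A's accumulator/flush character loop with a regex-findall style scan
-- (maximal non-punctuation run, or one punctuation char, per token); objective: idiomatic.

-- ===== PORT A =====
-- char not in [",", "\n", ".", "?", "!", "(", ")"]
def pvIsPunct (c : Char) : Bool := c ∈ [',', '\n', '.', '?', '!', '(', ')']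

-- A's loop: state = (split_word, cumulative_word); the string concatenation
-- cumulative_word += char is kept as a List Char append, flushed via String.ofList.
def pvAGo : List Char → List String → List Char → List String
  | [], split_word, cumulative_word =>
      if cumulative_word.length > 0 then split_word ++ [String.ofList cumulative_word] else split_word
  | c :: cs, split_word, cumulative_word =>
      if !pvIsPunct c then
        pvAGo cs split_word (cumulative_word ++ [c])
      else if cumulative_word.length = 0 then
        pvAGo cs (split_word ++ [String.ofList [c]]) cumulative_word
      else
        pvAGo cs (split_word ++ [String.ofList cumulative_word, String.ofList [c]]) []

def split_and_cat_py (word : String) : List String :=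
  pvAGo word.toList [] []

-- ===== PORT B =====
-- regex findall r'[^,\n.?!()]+|[,\n.?!()]': at each position, either a maximal
-- run of non-punctuation characters, or a single punctuation character.
def pvBGo : List Char → List String
  | [] => []
  | c :: cs =>
      if pvIsPunct c then
        String.ofList [c] :: pvBGo cs
      else
        String.ofList (c :: cs.takeWhile (fun x => !pvIsPunct x)) ::
          pvBGo (cs.dropWhile (fun x => !pvIsPunct x))
termination_by l => l.length
decreasing_by
  all_goals have h := List.length_dropWhile_le (fun x => !pvIsPunct x) cs
  all_goals simp only [List.length_cons]
  all_goals omega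

def split_and_cat_py_alt (word : String) : List String :=
  pvBGo word.toList

-- ===== PRECONDITION & SPEC =====
def Spec_split_and_cat_py (word : String) (out : List String) : Prop := out = split_and_cat_py_alt word
instance (word : String) (out : List String) : Decidable (Spec_split_and_cat_py word out) := by unfold Spec_split_and_cat_py; infer_instance

-- ===== CLAIM (what is proved, stated in full; the proofs are below) =====
def Claim_equal_split_and_cat_py : Prop := ∀ (word : String), Dom_split_and_cat_py word → Spec_split_and_cat_py word (split_and_cat_py word)

-- ===== LEMMAS AND PROOFS =====

-- unfolding equations for the well-founded pvBGo
theorem pvBGo_nil : pvBGo [] = [] := by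
  rw [pvBGo.eq_def]

theorem pvBGo_cons (c : Char) (cs : List Char) :
    pvBGo (c :: cs) =
      if pvIsPunct c then
        String.ofList [c] :: pvBGo cs
      else
        String.ofList (c :: cs.takeWhile (fun x => !pvIsPunct x)) ::
          pvBGo (cs.dropWhile (fun x => !pvIsPunct x)) := by
  rw [pvBGo.eq_def]

-- B continued from a pending (already-read) run `cum`.
def pvBFlush (cum : List Char) (l : List Char) : List String :=
  if cum = [] then pvBGo l
  else String.ofList (cum ++ l.takeWhile (fun x => !pvIsPunct x)) ::
        pvBGo (l.dropWhile (fun x => !pvIsPunct x))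

theorem pvAGo_eq_flush (l : List Char) : ∀ (acc : List String) (cum : List Char),
    pvAGo l acc cum = acc ++ pvBFlush cum l := by
  induction l with
  | nil =>
    intro acc cum
    cases cum with
    | nil => simp [pvAGo, pvBFlush, pvBGo_nil]
    | cons a as => simp [pvAGo, pvBFlush, pvBGo_nil]
  | cons c cs ih =>
    intro acc cum
    by_cases hp : pvIsPunct c = true
    · cases cum with
      | nil =>
        rw [show pvAGo (c :: cs) acc [] = pvAGo cs (acc ++ [String.ofList [c]]) [] by
          simp [pvAGo, hp]]
        rw [ih]
        simp [pvBFlush, pvBGo_cons, hp]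
      | cons a as =>
        rw [show pvAGo (c :: cs) acc (a :: as)
              = pvAGo cs (acc ++ [String.ofList (a :: as), String.ofList [c]]) [] by
          simp [pvAGo, hp]]
        rw [ih]
        simp [pvBFlush, pvBGo_cons, hp, List.takeWhile, List.dropWhile]
    · rw [show pvAGo (c :: cs) acc cum = pvAGo cs acc (cum ++ [c]) by simp [pvAGo, hp]]
      rw [ih]
      cases cum with
      | nil => simp [pvBFlush, pvBGo_cons, hp]
      | cons a as => simp [pvBFlush, List.takeWhile, List.dropWhile, hp]

-- ===== VERDICT (by name: the statement is the Claim_ definition above) =====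
theorem split_and_cat_py_spec : Claim_equal_split_and_cat_py := by
  intro word _
  unfold Spec_split_and_cat_py split_and_cat_py split_and_cat_py_alt
  rw [pvAGo_eq_flush]
  simp [pvBFlush]
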